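-- pv_equiv track=rewrite | github.com/ivari/advent-of-code | 2022/12/mountain.py | build_start
-- ===== SOURCE A (Python) =====
-- def build_start(data):
--   stack = []
--
--   for i in range(len(data)):
--     for j in range(len(data[0])):
--       is_side = i == 0 or j == 0 or i == len(data) - 1 or j == len(data[0]) - 1
--
--       if is_side and (data[i][j] == 'a' or data[i][j] == 'S'):
--         stack.append([[i, j]])
--
--   return stack
-- ===== SOURCE B (Python) =====
-- def build_start(data):
--   h = len(data)
--   if h == 0:
--     return []
--   w = len(data[0])
--   if w == 0:
--     return []
--   out = [[[0, j]] for j in range(w) if data[0][j] in ('a', 'S')]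
--   last = w - 1
--   for i in range(1, h - 1):
--     row = data[i]
--     if row[0] in ('a', 'S'):
--       out.append([[i, 0]])
--     if last and row[last] in ('a', 'S'):
--       out.append([[i, last]])
--   if h > 1:
--     out += [[[h - 1, j]] for j in range(w) if data[h - 1][j] in ('a', 'S')]
--   return out
-- ===== Notes on version B (the rewrite author's own statement) =====
-- stated objective: faster
-- what changed: B enumerates only the O(R+C) border cells (full first/last rows, the two edge columns of each middle row) instead of scanning all R*C cells and testing each for being on the border.
import Mathlib
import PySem

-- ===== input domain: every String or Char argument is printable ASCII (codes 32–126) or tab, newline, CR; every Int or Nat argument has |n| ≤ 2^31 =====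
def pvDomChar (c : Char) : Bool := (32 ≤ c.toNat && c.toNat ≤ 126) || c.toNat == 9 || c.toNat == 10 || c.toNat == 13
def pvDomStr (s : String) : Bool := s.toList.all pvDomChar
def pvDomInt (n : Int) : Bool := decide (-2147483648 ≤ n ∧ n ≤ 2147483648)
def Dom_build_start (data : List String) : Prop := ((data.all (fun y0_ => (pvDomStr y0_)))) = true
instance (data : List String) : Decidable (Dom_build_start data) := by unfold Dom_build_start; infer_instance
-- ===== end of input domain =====

-- B visits only the border cells (first row, the two edge columns of each middle row, last row)
-- instead of scanning every cell and testing it for being on the border; same results, same order.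

-- ===== PORT A =====
def build_start (data : List String) : List (List (List Int)) :=
  (PySem.List.pyRange 0 (data.length : Int) 1).foldl (fun stack i =>
    (PySem.List.pyRange 0 (PySem.Str.len (PySem.List.pyGetD data 0 "")) 1).foldl (fun stack j =>
      if (i == 0 || j == 0 || i == (data.length : Int) - 1
            || j == PySem.Str.len (PySem.List.pyGetD data 0 "") - 1)
          && (PySem.Str.pyGet? (PySem.List.pyGetD data i "") j == some 'a'
                || PySem.Str.pyGet? (PySem.List.pyGetD data i "") j == some 'S') then
        stack ++ [[[i, j]]]
      else stack) stack) []

-- ===== PORT B =====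
def build_start_alt (data : List String) : List (List (List Int)) :=
  if ((data.length : Int) == 0) then []
  else if (PySem.Str.len (PySem.List.pyGetD data 0 "") == 0) then []
  else
    let w := PySem.Str.len (PySem.List.pyGetD data 0 "")
    let last := w - 1
    let out :=
      ((PySem.List.pyRange 0 w 1).filter (fun j =>
          PySem.Str.pyGet? (PySem.List.pyGetD data 0 "") j == some 'a'
            || PySem.Str.pyGet? (PySem.List.pyGetD data 0 "") j == some 'S')).map
        (fun j => [[(0 : Int), j]])
    let out :=
      (PySem.List.pyRange 1 ((data.length : Int) - 1) 1).foldl (fun out i =>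
        let row := PySem.List.pyGetD data i ""
        let out :=
          if PySem.Str.pyGet? row 0 == some 'a' || PySem.Str.pyGet? row 0 == some 'S' then
            out ++ [[[i, 0]]]
          else out
        if !(last == 0)
            && (PySem.Str.pyGet? row last == some 'a' || PySem.Str.pyGet? row last == some 'S') then
          out ++ [[[i, last]]]
        else out) out
    if 1 < (data.length : Int) then
      out ++
        ((PySem.List.pyRange 0 w 1).filter (fun j =>
            PySem.Str.pyGet? (PySem.List.pyGetD data ((data.length : Int) - 1) "") j == some 'a'
              || PySem.Str.pyGet? (PySem.List.pyGetD data ((data.length : Int) - 1) "") j == some 'S')).map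
          (fun j => [[(data.length : Int) - 1, j]])
    else out

-- ===== PRECONDITION & SPEC =====
-- Pre_ excludes exactly the ragged grids on which A raises IndexError (some row shorter than row 0).
def Pre_build_start (data : List String) : Prop :=
  ∀ s ∈ data, PySem.Str.len (data.headD "") ≤ PySem.Str.len s
instance (data : List String) : Decidable (Pre_build_start data) := by
  unfold Pre_build_start; infer_instance
def pvWitness_build_start : List String := ["aSb", "b.a", "Szb"]
def Spec_build_start (data : List String) (out : List (List (List Int))) : Prop := out = build_start_alt data
instance (data : List String) (out : List (List (List Int))) : Decidable (Spec_build_start data out) := by unfold Spec_build_start; infer_instance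

-- ===== CLAIM (what is proved, stated in full; the proofs are below) =====
def Claim_equal_build_start : Prop := ∀ (data : List String), Dom_build_start data → Pre_build_start data → Spec_build_start data (build_start data)

-- ===== LEMMAS AND PROOFS =====

-- the character test both programs apply at cell (i, j)
def pvT (data : List String) (i j : Int) : Bool :=
  PySem.Str.pyGet? (PySem.List.pyGetD data i "") j == some 'a'
    || PySem.Str.pyGet? (PySem.List.pyGetD data i "") j == some 'S'

-- what A's inner loop contributes for row i
def pvRowA (data : List String) (i : Int) : List (List (List Int)) :=
  ((PySem.List.pyRange 0 (PySem.Str.len (PySem.List.pyGetD data 0 "")) 1).filter (fun j =>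
      (i == 0 || j == 0 || i == (data.length : Int) - 1
          || j == PySem.Str.len (PySem.List.pyGetD data 0 "") - 1)
        && pvT data i j)).map (fun j => [[i, j]])

theorem pvA_flat (data : List String) :
    build_start data = (PySem.List.pyRange 0 (data.length : Int) 1).flatMap (pvRowA data) := by
  unfold build_start
  have hrow : ∀ (acc : List (List (List Int))) (i : Int),
      (PySem.List.pyRange 0 (PySem.Str.len (PySem.List.pyGetD data 0 "")) 1).foldl (fun stack j =>
        if (i == 0 || j == 0 || i == (data.length : Int) - 1
              || j == PySem.Str.len (PySem.List.pyGetD data 0 "") - 1)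
            && (PySem.Str.pyGet? (PySem.List.pyGetD data i "") j == some 'a'
                  || PySem.Str.pyGet? (PySem.List.pyGetD data i "") j == some 'S') then
          stack ++ [[[i, j]]]
        else stack) acc = acc ++ pvRowA data i := by
    intro acc i
    exact PySem.List.foldl_append_if _ _ _ _
  simp only [hrow]
  rw [PySem.List.foldl_append_eq_flatMap, List.nil_append]

-- the border columns of a middle row, as A filters them out of range(w)
theorem pvBorder_filter (w : Int) (hw : 0 ≤ w) :
    (PySem.List.pyRange 0 w 1).filter (fun j => j == 0 || j == w - 1)
      = if w = 0 then [] else if w = 1 then [0] else [0, w - 1] := by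
  by_cases h0 : w = 0
  · subst h0; simp [PySem.List.pyRange_one_eq_nil]
  by_cases h1 : w = 1
  · subst h1
    rw [show PySem.List.pyRange 0 1 1 = [0] from PySem.List.pyRange_one_singleton 0]
    simp
  have h2 : 2 ≤ w := by omega
  rw [PySem.List.pyRange_one_append 0 1 w (by omega) (by omega),
      PySem.List.pyRange_one_append 1 (w - 1) w (by omega) (by omega)]
  rw [show PySem.List.pyRange 0 1 1 = [0] from PySem.List.pyRange_one_singleton 0]
  have hmid : (PySem.List.pyRange 1 (w - 1) 1).filter (fun j => j == 0 || j == w - 1) = [] := by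
    rw [List.filter_eq_nil_iff]
    intro j hj
    rw [PySem.List.mem_pyRange_one] at hj
    simp only [Bool.or_eq_true, beq_iff_eq]
    omega
  have hlast : PySem.List.pyRange (w - 1) w 1 = [w - 1] := by
    have := PySem.List.pyRange_one_singleton (w - 1)
    simpa [show w - 1 + 1 = w by omega] using this
  simp [hlast, List.filter_append, hmid, h0, h1]

-- an edge row (i = 0 or i = h-1) keeps every column that passes the character test
theorem pvRowA_edge (data : List String) (i : Int)
    (h : i = 0 ∨ i = (data.length : Int) - 1) :
    pvRowA data i
      = ((PySem.List.pyRange 0 (PySem.Str.len (PySem.List.pyGetD data 0 "")) 1).filter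
          (pvT data i)).map (fun j => [[i, j]]) := by
  unfold pvRowA
  apply congrArg (List.map _)
  apply List.filter_congr
  intro j hj
  rcases h with h | h <;> simp [h]

-- a middle row keeps only columns 0 and w-1 (w ≠ 0; B never reaches its middle loop when w = 0)
theorem pvRowA_mid (data : List String) (i : Int)
    (h1 : i ≠ 0) (h2 : i ≠ (data.length : Int) - 1)
    (h0 : PySem.Str.len (PySem.List.pyGetD data 0 "") ≠ 0) :
    pvRowA data i
      = (if pvT data i 0 then [[[i, 0]]] else [])
          ++ (if !((PySem.Str.len (PySem.List.pyGetD data 0 "") - 1) == 0)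
                && pvT data i (PySem.Str.len (PySem.List.pyGetD data 0 "") - 1) then
              [[[i, PySem.Str.len (PySem.List.pyGetD data 0 "") - 1]]]
            else []) := by
  unfold pvRowA
  set w := PySem.Str.len (PySem.List.pyGetD data 0 "") with hw
  have hw0 : 0 ≤ w := by rw [hw, PySem.Str.len_eq]; exact_mod_cast Nat.zero_le _
  have e1 : (i == 0) = false := beq_eq_false_iff_ne.mpr h1
  have e2 : (i == (data.length : Int) - 1) = false := beq_eq_false_iff_ne.mpr h2
  simp only [e1, e2, Bool.false_or, Bool.or_false]
  rw [show (fun j : Int => (j == 0 || j == w - 1) && pvT data i j)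
        = (fun j : Int => pvT data i j && (j == 0 || j == w - 1)) from
      funext fun j => Bool.and_comm _ _,
    ← List.filter_filter, pvBorder_filter w hw0]
  by_cases hw1 : w = 1
  · have hz : ((w - 1 : Int) == 0) = true := by simp only [beq_iff_eq]; omega
    rw [if_neg h0, if_pos hw1]
    cases ht0 : pvT data i 0 <;> simp [List.filter, ht0, show w - 1 = 0 by omega]
  · have hne : ((w - 1 : Int) == 0) = false := beq_eq_false_iff_ne.mpr (by omega)
    rw [if_neg h0, if_neg hw1]
    cases ht0 : pvT data i 0 <;> cases htl : pvT data i (w - 1) <;>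
      simp [List.filter, ht0, htl, hne]

theorem build_start_spec : Claim_equal_build_start := by
  intro data _ _
  unfold Spec_build_start
  rw [pvA_flat]
  unfold build_start_alt
  by_cases hnil : data.length = 0
  · simp [hnil, PySem.List.pyRange_one_eq_nil]
  have hH1 : (1 : Int) ≤ (data.length : Int) := by exact_mod_cast Nat.one_le_iff_ne_zero.mpr hnil
  have hpos : ((data.length : Int) == 0) = false :=
    beq_eq_false_iff_ne.mpr (by exact_mod_cast hnil)
  set w := PySem.Str.len (PySem.List.pyGetD data 0 "") with hw
  have hw0 : 0 ≤ w := by rw [hw, PySem.Str.len_eq]; exact_mod_cast Nat.zero_le _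
  by_cases hwz : w = 0
  · -- every row contributes nothing: range(w) is empty
    have hlen : PySem.Str.len (PySem.List.pyGetD data 0 "") = 0 := by rw [← hw]; exact hwz
    have hall : ∀ i, pvRowA data i = [] := by
      intro i; unfold pvRowA
      rw [hlen, PySem.List.pyRange_one_eq_nil (le_refl 0)]
      simp
    simp [hpos, hwz, hall, List.flatMap]
  have hwzb : (w == 0) = false := beq_eq_false_iff_ne.mpr hwz
  simp only [hpos, hwzb, Bool.false_eq_true, if_false]
  -- B's middle loop extends row by row
  have hmidfold : ∀ (init : List (List (List Int))),
      (PySem.List.pyRange 1 ((data.length : Int) - 1) 1).foldl (fun out i =>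
        let row := PySem.List.pyGetD data i ""
        let out :=
          if PySem.Str.pyGet? row 0 == some 'a' || PySem.Str.pyGet? row 0 == some 'S' then
            out ++ [[[i, 0]]]
          else out
        if !((w - 1) == 0)
            && (PySem.Str.pyGet? row (w - 1) == some 'a'
                  || PySem.Str.pyGet? row (w - 1) == some 'S') then
          out ++ [[[i, w - 1]]]
        else out) init
      = init ++ (PySem.List.pyRange 1 ((data.length : Int) - 1) 1).flatMap (fun i =>
          (if pvT data i 0 then [[[i, 0]]] else [])
            ++ (if !((w - 1) == 0) && pvT data i (w - 1) then [[[i, w - 1]]] else [])) := by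
    intro init
    rw [PySem.List.foldl_congr_mem
          (g := fun out i => out ++ ((if pvT data i 0 then [[[i, 0]]] else [])
            ++ (if !((w - 1) == 0) && pvT data i (w - 1) then [[[i, w - 1]]] else [])))]
    · exact PySem.List.foldl_append_eq_flatMap _ _ _
    · intro acc i _
      simp only [pvT]
      split_ifs <;> simp_all
  by_cases hH2 : (data.length : Int) = 1
  · -- a single row: it is both the first and the last row; A visits only it
    have hr : PySem.List.pyRange 0 (data.length : Int) 1 = [0] := by
      rw [hH2]; exact PySem.List.pyRange_one_singleton 0
    have hmr : PySem.List.pyRange 1 ((data.length : Int) - 1) 1 = [] :=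
      PySem.List.pyRange_one_eq_nil (by omega)
    rw [hr, hmidfold, hmr]
    have h1h : ¬ (1 < (data.length : Int)) := by omega
    simp only [List.flatMap_nil, List.append_nil, if_neg h1h]
    rw [show ([0] : List Int).flatMap (pvRowA data) = pvRowA data 0 by simp]
    rw [pvRowA_edge data 0 (Or.inl rfl), ← hw]
    rfl
  · -- at least two rows: first row ++ middle rows ++ last row
    have hH2' : (2 : Int) ≤ (data.length : Int) := by omega
    rw [PySem.List.pyRange_one_append 0 1 (data.length : Int) (by omega) (by omega),
        PySem.List.pyRange_one_append 1 ((data.length : Int) - 1) (data.length : Int)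
          (by omega) (by omega),
        show PySem.List.pyRange 0 1 1 = [0] from PySem.List.pyRange_one_singleton 0,
        show PySem.List.pyRange ((data.length : Int) - 1) (data.length : Int) 1
            = [(data.length : Int) - 1] by
          have := PySem.List.pyRange_one_singleton ((data.length : Int) - 1)
          simpa [show (data.length : Int) - 1 + 1 = (data.length : Int) by omega] using this]
    rw [hmidfold]
    have h1h : 1 < (data.length : Int) := by omega
    simp only [List.flatMap_append, List.flatMap_cons, List.flatMap_nil, List.append_nil,
      if_pos h1h]
    rw [pvRowA_edge data 0 (Or.inl rfl), pvRowA_edge data ((data.length : Int) - 1) (Or.inr rfl),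
        ← hw]
    have hmid : (PySem.List.pyRange 1 ((data.length : Int) - 1) 1).flatMap (pvRowA data)
        = (PySem.List.pyRange 1 ((data.length : Int) - 1) 1).flatMap (fun i =>
            (if pvT data i 0 then [[[i, 0]]] else [])
              ++ (if !((w - 1) == 0) && pvT data i (w - 1) then [[[i, w - 1]]] else [])) := by
      rw [List.flatMap_def, List.flatMap_def]
      refine congrArg List.flatten (List.map_congr_left ?_)
      intro i hi
      rw [PySem.List.mem_pyRange_one] at hi
      rw [pvRowA_mid data i (by omega) (by omega) (by rw [← hw]; exact hwz), ← hw]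
    rw [hmid]
    unfold pvT
    simp [List.append_assoc]
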